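-- pv_equiv track=rewrite | github.com/Kinrokin/KT | KT_PROD_CLEANROOM/tools/operator/cohort0_third_successor_bridge_bound_tranche.py | _require_same_subject_head
-- ===== SOURCE A (Python) =====
-- from typing import Any, Dict, List, Optional, Sequence
--
-- def _require_same_subject_head(packets: Sequence[Dict[str, Any]]) -> str:
--     heads = {
--         str(packet.get("subject_head", "")).strip()
--         for packet in packets
--         if isinstance(packet, dict) and str(packet.get("subject_head", "")).strip()
--     }
--     if len(heads) != 1:
--         raise RuntimeError("FAIL_CLOSED: third-wave bridge-bound tranche requires one same-head authority line")
--     return next(iter(heads))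
-- ===== SOURCE B (Python) =====
-- from typing import Any, Dict, Sequence
--
-- def _require_same_subject_head(packets: Sequence[Dict[str, Any]]) -> str:
--     head = None
--     for packet in packets:
--         if not isinstance(packet, dict):
--             continue
--         h = str(packet.get("subject_head", "")).strip()
--         if not h:
--             continue
--         if head is None:
--             head = h
--         elif h != head:
--             raise RuntimeError("FAIL_CLOSED: third-wave bridge-bound tranche requires one same-head authority line")
--     if head is None:
--         raise RuntimeError("FAIL_CLOSED: third-wave bridge-bound tranche requires one same-head authority line")
--     return head
-- ===== Notes on version B (the rewrite author's own statement) =====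
-- stated objective: simpler
-- what changed: Replaces the set-comprehension that collects all distinct stripped heads and checks its cardinality with a single-pass loop maintaining one sentinel head, failing fast on the first mismatch and on an empty result.
import Mathlib
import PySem

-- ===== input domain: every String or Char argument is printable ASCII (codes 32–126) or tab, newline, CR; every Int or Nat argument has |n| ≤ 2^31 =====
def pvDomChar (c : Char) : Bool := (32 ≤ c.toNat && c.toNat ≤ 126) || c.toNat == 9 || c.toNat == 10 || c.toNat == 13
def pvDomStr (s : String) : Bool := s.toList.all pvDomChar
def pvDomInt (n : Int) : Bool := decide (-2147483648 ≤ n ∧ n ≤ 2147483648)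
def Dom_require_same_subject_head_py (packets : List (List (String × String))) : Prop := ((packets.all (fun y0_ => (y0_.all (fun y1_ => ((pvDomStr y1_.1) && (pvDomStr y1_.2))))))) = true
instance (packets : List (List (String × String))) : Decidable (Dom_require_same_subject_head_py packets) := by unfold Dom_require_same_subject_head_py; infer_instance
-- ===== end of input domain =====

-- B replaces A's distinct-heads set (built by a comprehension, then a cardinality check) with a
-- single-pass loop keeping one sentinel head; same values, same failure cases (simpler).

-- str(packet.get("subject_head", "")).strip() — shared by both Pythons verbatim
def pvStripHead (packet : List (String × String)) : String :=
  PySem.Str.strip ((PySem.Dict.mk packet).getD "subject_head" "")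

-- the comprehension's filter: the stripped head is truthy (non-empty)
def pvKeep (h : String) : Bool := h ≠ ""

-- ===== PORT A =====
-- heads = { strip(...) for packet in packets if strip(...) } ; len(heads) != 1 → raise ; next(iter(heads))
def require_same_subject_head_py (packets : List (List (String × String))) : String :=
  let heads : PySem.Set String :=
    PySem.Set.ofList ((packets.map pvStripHead).filter pvKeep)
  if PySem.Set.len heads ≠ 1 then ""   -- Python raises RuntimeError here; excluded by Pre_
  else heads.headD ""

-- ===== PORT B =====
-- one pass; state = (sentinel head, error flag); error flag = the raise in Source B (outside Pre_)
def pvAltStep (st : Option String × Bool) (packet : List (String × String)) :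
    Option String × Bool :=
  if st.2 then st
  else
    let h := pvStripHead packet
    if h = "" then st
    else
      match st.1 with
      | none => (some h, false)
      | some x => if h = x then st else (st.1, true)

def require_same_subject_head_py_alt (packets : List (List (String × String))) : String :=
  match packets.foldl pvAltStep (none, false) with
  | (some h, false) => h
  | _ => ""                            -- Python raises RuntimeError here; excluded by Pre_

-- ===== PRECONDITION & SPEC =====
-- Pre_: A returns iff exactly one distinct non-empty stripped head occurs (else RuntimeError).
def Pre_require_same_subject_head_py (packets : List (List (String × String))) : Prop :=
  let hs := (packets.map pvStripHead).filter pvKeep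
  hs ≠ [] ∧ ∀ h ∈ hs, h = hs.headD ""

instance (packets : List (List (String × String))) : Decidable (Pre_require_same_subject_head_py packets) := by
  unfold Pre_require_same_subject_head_py; infer_instance

def pvWitness_require_same_subject_head_py : (List (List (String × String))) :=
  [[("subject_head", " core ")], [("subject_head", "core")]]

def Spec_require_same_subject_head_py (packets : List (List (String × String))) (out : String) : Prop := out = require_same_subject_head_py_alt packets
instance (packets : List (List (String × String))) (out : String) : Decidable (Spec_require_same_subject_head_py packets out) := by unfold Spec_require_same_subject_head_py; infer_instance

-- ===== CLAIM (what is proved, stated in full; the proofs are below) =====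
def Claim_equal_require_same_subject_head_py : Prop := ∀ (packets : List (List (String × String))), Dom_require_same_subject_head_py packets → Pre_require_same_subject_head_py packets → Spec_require_same_subject_head_py packets (require_same_subject_head_py packets)

-- ===== LEMMAS AND PROOFS =====

-- set(l) of a list whose elements all equal c is [] or [c]
lemma ofList_const {c : String} : ∀ (l : List String), (∀ x ∈ l, x = c) →
    PySem.Set.ofList l = [] ∨ PySem.Set.ofList l = [c] := by
  intro l
  induction l with
  | nil => intro _; left; rfl
  | cons x xs ih =>
    intro h
    have hx : x = c := h x (by simp)
    right
    rcases ih (fun y hy => h y (by simp [hy])) with h0 | h1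
    · simp [PySem.Set.ofList_cons, h0, hx, PySem.Set.discard]
    · simp [PySem.Set.ofList_cons, h1, hx, PySem.Set.discard]

-- the filtered head list over p :: ps, by cases on the head of p
lemma filter_heads_cons_of_empty {p : List (String × String)}
    (ps : List (List (String × String))) (hp : pvStripHead p = "") :
    ((p :: ps).map pvStripHead).filter pvKeep = (ps.map pvStripHead).filter pvKeep := by
  simp [pvKeep, hp]

lemma filter_heads_cons_of_ne {p : List (String × String)}
    (ps : List (List (String × String))) (hp : ¬ pvStripHead p = "") :
    ((p :: ps).map pvStripHead).filter pvKeep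
      = pvStripHead p :: (ps.map pvStripHead).filter pvKeep := by
  simp [pvKeep, hp]

-- B's fold, started at (some c, false), stays there when every remaining head equals c
lemma foldl_alt_some {c : String} : ∀ (ps : List (List (String × String))),
    (∀ h ∈ (ps.map pvStripHead).filter pvKeep, h = c) →
    ps.foldl pvAltStep (some c, false) = (some c, false) := by
  intro ps
  induction ps with
  | nil => intro _; rfl
  | cons p ps ih =>
    intro h
    by_cases hp : pvStripHead p = ""
    · have htail := ih (fun y hy => h y (by rw [filter_heads_cons_of_empty ps hp]; exact hy))
      have hstep : pvAltStep (some c, false) p = (some c, false) := by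
        simp [pvAltStep, hp]
      rw [List.foldl_cons, hstep, htail]
    · have hpc : pvStripHead p = c := h _ (by rw [filter_heads_cons_of_ne ps hp]; simp)
      have htail := ih (by
        intro y hy
        exact h y (by rw [filter_heads_cons_of_ne ps hp]; exact List.mem_cons_of_mem _ hy))
      have hstep : pvAltStep (some c, false) p = (some c, false) := by
        simp [pvAltStep, hpc]
      rw [List.foldl_cons, hstep, htail]

-- B's fold from the initial state reaches (some c, false) as soon as some head exists
lemma foldl_alt_none {c : String} : ∀ (ps : List (List (String × String))),
    (∀ h ∈ (ps.map pvStripHead).filter pvKeep, h = c) →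
    (ps.map pvStripHead).filter pvKeep ≠ [] →
    ps.foldl pvAltStep (none, false) = (some c, false) := by
  intro ps
  induction ps with
  | nil => intro _ hne; simp at hne
  | cons p ps ih =>
    intro h hne
    by_cases hp : pvStripHead p = ""
    · have h' := fun y hy => h y (by rw [filter_heads_cons_of_empty ps hp]; exact hy)
      have hne' : (ps.map pvStripHead).filter pvKeep ≠ [] := by
        rw [filter_heads_cons_of_empty ps hp] at hne; exact hne
      have hstep : pvAltStep (none, false) p = (none, false) := by
        simp [pvAltStep, hp]
      rw [List.foldl_cons, hstep]; exact ih h' hne'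
    · have hpc : pvStripHead p = c := h _ (by rw [filter_heads_cons_of_ne ps hp]; simp)
      have h' : ∀ y ∈ (ps.map pvStripHead).filter pvKeep, y = c := by
        intro y hy
        exact h y (by rw [filter_heads_cons_of_ne ps hp]; exact List.mem_cons_of_mem _ hy)
      have hcne : ¬ c = "" := hpc ▸ hp
      have hstep : pvAltStep (none, false) p = (some c, false) := by
        simp only [pvAltStep]
        simp [hpc, hcne]
      rw [List.foldl_cons, hstep]; exact foldl_alt_some ps h'

-- ===== VERDICT (by name: the statement is the Claim_ definition above) =====
theorem require_same_subject_head_py_spec : Claim_equal_require_same_subject_head_py := by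
  intro packets _ hpre
  obtain ⟨hne, hall⟩ := hpre
  set hs := (packets.map pvStripHead).filter pvKeep with hhs
  set c := hs.headD "" with hc
  have hAne : PySem.Set.ofList hs ≠ [] := by
    cases hsv : hs with
    | nil => exact absurd hsv hne
    | cons x t => rw [PySem.Set.ofList_cons]; simp
  have hAset : PySem.Set.ofList hs = [c] := by
    rcases ofList_const hs hall with h0 | h1
    · exact absurd h0 hAne
    · exact h1
  have hB : packets.foldl pvAltStep (none, false) = (some c, false) :=
    foldl_alt_none packets hall hne
  show require_same_subject_head_py packets = require_same_subject_head_py_alt packets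
  simp [require_same_subject_head_py, require_same_subject_head_py_alt, hB, ← hhs, hAset,
    PySem.Set.len]
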